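-- pv_equiv track=rewrite | github.com/michaelmech/Pluribass | data_gen.py | _hero_checked_prev_street
-- ===== SOURCE A (Python) =====
-- from typing import List, Tuple, Dict, Any
-- from typing import List, Tuple, Dict, Any
-- from typing import Optional, Tuple, List, Dict
-- from typing import List, Dict
-- from typing import List, Tuple, Dict, Any
-- from typing import List, Tuple, Dict, Any, Optional
-- from typing import Optional, Tuple, List
--
-- def determine_phase(action_idx, actions):
--     board_card_actions = [i for i, a in enumerate(actions) if a.startswith('d db')]
--     if not board_card_actions:
--         return 'preflop'
--     elif action_idx < board_card_actions[0]:
--         return 'preflop'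
--     elif len(board_card_actions) == 1 or action_idx < board_card_actions[1]:
--         return 'flop'
--     elif len(board_card_actions) == 2 or action_idx < board_card_actions[2]:
--         return 'turn'
--     else:
--         return 'river'
--
-- def _hero_checked_prev_street(past: List[str], hero_tag: str, cur_street: str) -> int:
--     """Did hero check (i.e., 'cc' with no amount) on the previous street?"""
--     prev = {"flop": "preflop", "turn": "flop", "river": "turn"}.get(cur_street)
--     if prev is None:
--         return 0
--     # scan from end backwards for the last action on prev street
--     last = None
--     for i in range(len(past) - 1, -1, -1):
--         if determine_phase(i, past) != prev:
--             if last is not None: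
--                 break
--             else:
--                 continue
--         a = past[i]
--         if not a.startswith(hero_tag + " "):
--             continue
--         parts = a.split()
--         typ = parts[1] if len(parts) > 1 else ""
--         amt = (int(parts[2]) if len(parts) > 2 and parts[2].isdigit() else None)
--         last = (typ, amt)
--         break
--     if last is None:
--         return 0
--     typ, amt = last
--     return int(typ == "cc" and (amt is None))
-- ===== SOURCE B (Python) =====
-- def _hero_checked_prev_street(past, hero_tag, cur_street):
--     """Did hero check (i.e., 'cc' with no amount) on the previous street?
--
--     Finds the board-card action indices once, derives the [lo, hi) index
--     window of the previous street, and scans only that window backwards.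
--     """
--     prev = {"flop": "preflop", "turn": "flop", "river": "turn"}.get(cur_street)
--     if prev is None:
--         return 0
--     board = [i for i, a in enumerate(past) if a.startswith('d db')]
--     n = len(past)
--     if prev == "preflop":
--         lo, hi = 0, (board[0] if board else n)
--     elif prev == "flop":
--         if not board:
--             return 0
--         lo, hi = board[0], (board[1] if len(board) > 1 else n)
--     else:  # prev == "turn"
--         if len(board) < 2:
--             return 0
--         lo, hi = board[1], (board[2] if len(board) > 2 else n)
--     for i in reversed(range(lo, hi)):
--         a = past[i]
--         if a.startswith(hero_tag + " "):
--             parts = a.split()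
--             typ = parts[1] if len(parts) > 1 else ""
--             amt = int(parts[2]) if len(parts) > 2 and parts[2].isdigit() else None
--             return int(typ == "cc" and amt is None)
--     return 0
-- ===== Notes on version B (the rewrite author's own statement) =====
-- stated objective: alternative
-- what changed: A recomputes determine_phase (which rebuilds the board-card index list) for every index while scanning backwards; B computes the board-card action indices once, derives the previous street's [lo, hi) index window from them, and scans only that window backwards.
import Mathlib
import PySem

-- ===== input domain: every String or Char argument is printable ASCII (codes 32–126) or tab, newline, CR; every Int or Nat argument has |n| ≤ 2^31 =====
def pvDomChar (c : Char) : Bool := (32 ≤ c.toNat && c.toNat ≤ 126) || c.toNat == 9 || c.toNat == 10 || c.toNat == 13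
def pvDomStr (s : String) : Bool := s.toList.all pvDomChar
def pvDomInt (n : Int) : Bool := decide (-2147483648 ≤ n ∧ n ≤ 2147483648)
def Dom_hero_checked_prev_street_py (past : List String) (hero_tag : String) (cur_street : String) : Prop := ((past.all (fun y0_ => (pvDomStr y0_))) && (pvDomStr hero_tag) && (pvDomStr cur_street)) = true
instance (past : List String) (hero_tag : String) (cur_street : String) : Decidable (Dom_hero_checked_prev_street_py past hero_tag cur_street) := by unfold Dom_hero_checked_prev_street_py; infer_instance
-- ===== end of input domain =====

-- B computes the board-card action indices once and scans only the previous street's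
-- [lo, hi) index window, instead of recomputing determine_phase for every index as A does.

-- ===== PORT A =====

-- '{"flop": "preflop", "turn": "flop", "river": "turn"}' (shared by both Pythons, line for line)
def pvPrevDict : PySem.Dict String String :=
  PySem.Dict.mk [("flop", "preflop"), ("turn", "flop"), ("river", "turn")]

-- '[i for i, a in enumerate(actions) if a.startswith('d db')]' (appears verbatim in A and in B)
def pvBoardIdx (actions : List String) : List Int :=
  ((PySem.List.enumerate actions 0).filter (fun p => PySem.Str.startswith p.2 "d db")).map (·.1)

-- 'parts = a.split(); typ = …; amt = …' — the identical parsing lines of A and B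
def pvParse (a : String) : String × Option Int :=
  let parts := PySem.Str.split₀ a
  let typ := if parts.length > 1 then parts.getD 1 "" else ""
  let amt := if parts.length > 2 && PySem.Str.strIsdigit (parts.getD 2 "") then
               PySem.Int.ofStr? (parts.getD 2 "")  -- parts[2].isdigit() ⇒ int(parts[2]) succeeds
             else none
  (typ, amt)

def determine_phase (action_idx : Int) (actions : List String) : String :=
  match pvBoardIdx actions with
  | [] => "preflop"
  | b0 :: rest =>
    if action_idx < b0 then "preflop"
    else match rest with
      | [] => "flop"
      | b1 :: rest2 =>
        if action_idx < b1 then "flop"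
        else match rest2 with
          | [] => "turn"
          | b2 :: _ => if action_idx < b2 then "turn" else "river"

-- 'for i in range(len(past) - 1, -1, -1): …' with the carried 'last'
def pvALoop (past : List String) (hero_tag : String) (prev : String) :
    Nat → Option (String × Option Int) → Option (String × Option Int)
  | 0, last => last
  | i + 1, last =>
    if determine_phase (i : Int) past ≠ prev then
      (if last.isSome then last else pvALoop past hero_tag prev i last)
    else
      let a := PySem.List.pyGetD past (i : Int) ""   -- past[i], index always in range here
      if !(PySem.Str.startswith a (hero_tag ++ " ")) then pvALoop past hero_tag prev i last
      else some (pvParse a)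

def hero_checked_prev_street_py (past : List String) (hero_tag : String) (cur_street : String) : Int :=
  match PySem.Dict.get? pvPrevDict cur_street with
  | none => 0
  | some prev =>
    match pvALoop past hero_tag prev past.length none with
    | none => 0
    | some (typ, amt) => if typ == "cc" && amt.isNone then 1 else 0

-- ===== PORT B =====

-- 'for i in reversed(range(lo, hi)): …' with early return on the hero's action
def pvBScan (past : List String) (hero_tag : String) : List Int → Int
  | [] => 0
  | i :: rest =>
    let a := PySem.List.pyGetD past i ""   -- past[i], index always in range here
    if PySem.Str.startswith a (hero_tag ++ " ") then
      let p := pvParse a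
      if p.1 == "cc" && p.2.isNone then 1 else 0
    else pvBScan past hero_tag rest

def hero_checked_prev_street_py_alt (past : List String) (hero_tag : String) (cur_street : String) : Int :=
  match PySem.Dict.get? pvPrevDict cur_street with
  | none => 0
  | some prev =>
    let board := pvBoardIdx past
    let n : Int := past.length
    if prev == "preflop" then
      let hi := match board with | [] => n | b0 :: _ => b0
      pvBScan past hero_tag ((PySem.List.pyRange 0 hi 1).reverse)
    else if prev == "flop" then
      match board with
      | [] => 0
      | b0 :: rest =>
        let hi := match rest with | [] => n | b1 :: _ => b1
        pvBScan past hero_tag ((PySem.List.pyRange b0 hi 1).reverse)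
    else
      match board with
      | [] => 0
      | [_] => 0
      | _ :: b1 :: rest2 =>
        let hi := match rest2 with | [] => n | b2 :: _ => b2
        pvBScan past hero_tag ((PySem.List.pyRange b1 hi 1).reverse)

-- ===== PRECONDITION & SPEC =====
def Spec_hero_checked_prev_street_py (past : List String) (hero_tag : String) (cur_street : String) (out : Int) : Prop := out = hero_checked_prev_street_py_alt past hero_tag cur_street
instance (past : List String) (hero_tag : String) (cur_street : String) (out : Int) : Decidable (Spec_hero_checked_prev_street_py past hero_tag cur_street out) := by unfold Spec_hero_checked_prev_street_py; infer_instance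

-- ===== CLAIM (what is proved, stated in full; the proofs are below) =====
def Claim_equal_hero_checked_prev_street_py : Prop := ∀ (past : List String) (hero_tag : String) (cur_street : String), Dom_hero_checked_prev_street_py past hero_tag cur_street → Spec_hero_checked_prev_street_py past hero_tag cur_street (hero_checked_prev_street_py past hero_tag cur_street)

-- ===== LEMMAS AND PROOFS =====

def pvPost : Option (String × Option Int) → Int
  | none => 0
  | some p => if p.1 == "cc" && p.2.isNone then 1 else 0

theorem pvBoardIdx_mem {past : List String} {j : Int} (h : j ∈ pvBoardIdx past) :
    0 ≤ j ∧ j < past.length := by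
  unfold pvBoardIdx at h
  obtain ⟨p, hp, rfl⟩ := List.mem_map.1 h
  have := List.mem_filter.1 hp
  obtain ⟨k, hk, rfl⟩ := (PySem.List.mem_enumerate_iff _ _ _).1 this.1
  simp; omega

theorem pvBoardIdx_sorted (past : List String) : (pvBoardIdx past).Pairwise (· < ·) := by
  unfold pvBoardIdx
  exact ((PySem.List.pairwise_lt_enumerate past 0).filter _).map _ (fun _ _ h => h)

-- A's backward scan with per-index phases = B's scan of the filtered index list
theorem pvALoop_eq (past : List String) (tag prev : String) :
    ∀ i : Nat,
      pvPost (pvALoop past tag prev i none)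
        = pvBScan past tag
            (((PySem.List.pyRange 0 (i : Int) 1).filter
               (fun j => determine_phase j past == prev)).reverse) := by
  intro i
  induction i with
  | zero => simp [pvALoop, pvPost, PySem.List.pyRange_one_eq_nil, pvBScan]
  | succ i ih =>
    have hsplit : PySem.List.pyRange 0 ((i : Int) + 1) 1
        = PySem.List.pyRange 0 (i : Int) 1 ++ [(i : Int)] :=
      PySem.List.pyRange_one_succ_right (by positivity)
    push_cast
    rw [hsplit, List.filter_append, List.reverse_append]
    by_cases hph : determine_phase (i : Int) past = prev
    · have hfil : List.filter (fun j => determine_phase j past == prev) [(i : Int)]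
          = [(i : Int)] := by simp [hph]
      rw [hfil]
      simp only [List.reverse_cons, List.reverse_nil, List.nil_append, List.singleton_append]
      by_cases hh : PySem.Str.startswith (PySem.List.pyGetD past (i : Int) "") (tag ++ " ") = true
      · simp only [pvALoop, pvBScan, hph]
        simp only [hh, ne_eq, not_true_eq_false, if_false, Bool.not_true, Bool.false_eq_true,
          if_true]
        rfl
      · simp only [pvALoop, pvBScan, hph]
        simp only [ne_eq, not_true_eq_false, if_false]
        simp at hh
        simp [hh, ih]
    · have hfil : List.filter (fun j => determine_phase j past == prev) [(i : Int)]
          = [] := by simp [hph]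
      rw [hfil]
      simp only [List.reverse_nil, List.nil_append]
      simp only [pvALoop]
      rw [if_pos hph]
      simpa using ih

-- the filtered index list is exactly the [lo, hi) window
theorem pvFilter_window (past : List String) (prev : String) (lo hi : Int)
    (h0 : 0 ≤ lo) (hlh : lo ≤ hi) (hn : hi ≤ past.length)
    (hp : ∀ j : Int, 0 ≤ j → j < past.length →
      ((determine_phase j past == prev) = decide (lo ≤ j ∧ j < hi))) :
    (PySem.List.pyRange 0 (past.length : Int) 1).filter
        (fun j => determine_phase j past == prev)
      = PySem.List.pyRange lo hi 1 := by
  rw [PySem.List.pyRange_one_append 0 lo (past.length : Int) h0 (le_trans hlh hn),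
      PySem.List.pyRange_one_append lo hi (past.length : Int) hlh hn,
      List.filter_append, List.filter_append]
  have h1 : (PySem.List.pyRange 0 lo 1).filter (fun j => determine_phase j past == prev) = [] := by
    rw [List.filter_eq_nil_iff]
    intro j hj
    have hm := PySem.List.mem_pyRange_one.1 hj
    rw [hp j hm.1 (by omega)]
    simp; omega
  have h2 : (PySem.List.pyRange lo hi 1).filter (fun j => determine_phase j past == prev)
      = PySem.List.pyRange lo hi 1 := by
    rw [List.filter_eq_self]
    intro j hj
    have hm := PySem.List.mem_pyRange_one.1 hj
    rw [hp j (by omega) (by omega)]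
    simp; omega
  have h3 : (PySem.List.pyRange hi (past.length : Int) 1).filter
      (fun j => determine_phase j past == prev) = [] := by
    rw [List.filter_eq_nil_iff]
    intro j hj
    have hm := PySem.List.mem_pyRange_one.1 hj
    rw [hp j (by omega) hm.2]
    simp; omega
  rw [h1, h2, h3]; simp

-- combined: A's whole loop result = B's window scan
theorem pvA_window (past : List String) (tag prev : String) (lo hi : Int)
    (h0 : 0 ≤ lo) (hlh : lo ≤ hi) (hn : hi ≤ past.length)
    (hp : ∀ j : Int, 0 ≤ j → j < past.length →
      ((determine_phase j past == prev) = decide (lo ≤ j ∧ j < hi))) :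
    pvPost (pvALoop past tag prev past.length none)
      = pvBScan past tag ((PySem.List.pyRange lo hi 1).reverse) := by
  rw [pvALoop_eq, pvFilter_window past prev lo hi h0 hlh hn hp]

theorem pvDict_cases (c p : String) (h : PySem.Dict.get? pvPrevDict c = some p) :
    p = "preflop" ∨ p = "flop" ∨ p = "turn" := by
  unfold pvPrevDict at h
  rw [PySem.Dict.get?_mk_cons] at h
  split at h
  · exact Or.inl (Option.some.inj h).symm
  · rw [PySem.Dict.get?_mk_cons] at h
    split at h
    · exact Or.inr (Or.inl (Option.some.inj h).symm)
    · rw [PySem.Dict.get?_mk_cons] at h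
      split at h
      · exact Or.inr (Or.inr (Option.some.inj h).symm)
      · simp [PySem.Dict.get?] at h


theorem pvPhase_nil {past : List String} (hb : pvBoardIdx past = []) (j : Int) :
    determine_phase j past = "preflop" := by
  unfold determine_phase; rw [hb]

theorem pvPhase_preflop {past : List String} {b0 : Int} {rest : List Int}
    (hb : pvBoardIdx past = b0 :: rest) (j : Int) :
    (determine_phase j past == "preflop") = decide (j < b0) := by
  unfold determine_phase; rw [hb]
  rcases rest with _ | ⟨b1, rest2⟩
  · dsimp only; split_ifs <;> (simp; try omega)
  · rcases rest2 with _ | ⟨b2, r3⟩ <;> dsimp only <;> split_ifs <;> (simp; try omega)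

theorem pvPhase_flop1 {past : List String} {b0 : Int}
    (hb : pvBoardIdx past = [b0]) (j : Int) :
    (determine_phase j past == "flop") = decide (b0 ≤ j) := by
  unfold determine_phase; rw [hb]
  dsimp only; split_ifs <;> (simp; try omega)

theorem pvPhase_flop2 {past : List String} {b0 b1 : Int} {rest2 : List Int}
    (hb : pvBoardIdx past = b0 :: b1 :: rest2) (j : Int) :
    (determine_phase j past == "flop") = decide (b0 ≤ j ∧ j < b1) := by
  unfold determine_phase; rw [hb]
  rcases rest2 with _ | ⟨b2, r3⟩ <;> dsimp only <;> split_ifs <;> (simp; try omega)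

theorem pvPhase_turn1 {past : List String} {b0 : Int}
    (hb : pvBoardIdx past = [b0]) (j : Int) :
    (determine_phase j past == "turn") = false := by
  unfold determine_phase; rw [hb]
  dsimp only; split_ifs <;> simp

theorem pvPhase_turn2 {past : List String} {b0 b1 : Int}
    (hb : pvBoardIdx past = [b0, b1]) (hlt : b0 < b1) (j : Int) :
    (determine_phase j past == "turn") = decide (b1 ≤ j) := by
  unfold determine_phase; rw [hb]
  dsimp only; split_ifs <;> (simp; try omega)

theorem pvPhase_turn3 {past : List String} {b0 b1 b2 : Int} {r3 : List Int}
    (hb : pvBoardIdx past = b0 :: b1 :: b2 :: r3) (hlt : b0 < b1) (hlt2 : b1 < b2) (j : Int) :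
    (determine_phase j past == "turn") = decide (b1 ≤ j ∧ j < b2) := by
  unfold determine_phase; rw [hb]
  dsimp only; split_ifs <;> (simp; try omega)

-- ===== VERDICT (by name: the statement is the Claim_ definition above) =====
theorem hero_checked_prev_street_py_spec : Claim_equal_hero_checked_prev_street_py := by
  intro past tag cur _
  unfold Spec_hero_checked_prev_street_py
  cases hd : PySem.Dict.get? pvPrevDict cur with
  | none => unfold hero_checked_prev_street_py hero_checked_prev_street_py_alt; rw [hd]
  | some prev =>
    have hmem : ∀ j ∈ pvBoardIdx past, 0 ≤ j ∧ j < past.length := fun j h => pvBoardIdx_mem h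
    have hsort := pvBoardIdx_sorted past
    have hA : hero_checked_prev_street_py past tag cur
        = pvPost (pvALoop past tag prev past.length none) := by
      unfold hero_checked_prev_street_py; rw [hd]
      show (match pvALoop past tag prev past.length none with
            | none => (0 : Int)
            | some (typ, amt) => if typ == "cc" && amt.isNone then 1 else 0) = _
      cases hl : pvALoop past tag prev past.length none with
      | none => rfl
      | some p => cases p; rfl
    rw [hA]
    unfold hero_checked_prev_street_py_alt
    rw [hd]
    rcases pvDict_cases cur prev hd with rfl | rfl | rfl
    · -- prev = "preflop"
      simp only [beq_self_eq_true, if_true]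
      cases hb : pvBoardIdx past with
      | nil =>
        simp only [hb]
        exact pvA_window past tag _ 0 (past.length : Int) le_rfl (by positivity) le_rfl
          (fun j h1 h2 => by
            rw [show determine_phase j past = "preflop" from pvPhase_nil hb j]
            simp
            omega)
      | cons b0 rest =>
        have hb0 := hmem b0 (hb ▸ List.mem_cons_self ..)
        simp only [hb]
        exact pvA_window past tag _ 0 b0 le_rfl hb0.1 (le_of_lt hb0.2)
          (fun j h1 h2 => by rw [pvPhase_preflop hb j, decide_eq_decide]; omega)
    · -- prev = "flop"
      simp only [show (("flop" == "preflop") = false) from rfl, beq_self_eq_true, if_true,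
        if_false, Bool.false_eq_true]
      cases hb : pvBoardIdx past with
      | nil =>
        simp only [hb]
        rw [pvA_window past tag _ 0 0 le_rfl le_rfl (by positivity)
          (fun j h1 h2 => by
            rw [show determine_phase j past = "preflop" from pvPhase_nil hb j]
            simp)]
        rw [PySem.List.pyRange_one_eq_nil le_rfl]; rfl
      | cons b0 rest =>
        have hb0 := hmem b0 (hb ▸ List.mem_cons_self ..)
        cases rest with
        | nil =>
          simp only [hb]
          exact pvA_window past tag _ b0 (past.length : Int) hb0.1 (le_of_lt hb0.2) le_rfl
            (fun j h1 h2 => by rw [pvPhase_flop1 hb j, decide_eq_decide]; omega)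
        | cons b1 rest2 =>
          have hb1 := hmem b1 (hb ▸ List.mem_cons_of_mem _ (List.mem_cons_self ..))
          have h01 : b0 < b1 := by
            have hs := hsort; rw [hb] at hs
            exact (List.pairwise_cons.1 hs).1 b1 (List.mem_cons_self ..)
          simp only [hb]
          exact pvA_window past tag _ b0 b1 hb0.1 (le_of_lt h01) (le_of_lt hb1.2)
            (fun j h1 h2 => by rw [pvPhase_flop2 hb j])
    · -- prev = "turn"
      simp only [show (("turn" == "preflop") = false) from rfl,
        show (("turn" == "flop") = false) from rfl, if_false, Bool.false_eq_true]
      cases hb : pvBoardIdx past with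
      | nil =>
        simp only [hb]
        rw [pvA_window past tag _ 0 0 le_rfl le_rfl (by positivity)
          (fun j h1 h2 => by
            rw [show determine_phase j past = "preflop" from pvPhase_nil hb j]
            simp)]
        rw [PySem.List.pyRange_one_eq_nil le_rfl]; rfl
      | cons b0 rest =>
        have hb0 := hmem b0 (hb ▸ List.mem_cons_self ..)
        cases rest with
        | nil =>
          simp only [hb]
          rw [pvA_window past tag _ b0 b0 hb0.1 le_rfl (le_of_lt hb0.2)
            (fun j h1 h2 => by rw [pvPhase_turn1 hb j]; simp)]
          rw [PySem.List.pyRange_one_eq_nil le_rfl]; rfl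
        | cons b1 rest2 =>
          have hb1 := hmem b1 (hb ▸ List.mem_cons_of_mem _ (List.mem_cons_self ..))
          have h01 : b0 < b1 := by
            have hs := hsort; rw [hb] at hs
            exact (List.pairwise_cons.1 hs).1 b1 (List.mem_cons_self ..)
          cases rest2 with
          | nil =>
            simp only [hb]
            exact pvA_window past tag _ b1 (past.length : Int) hb1.1 (le_of_lt hb1.2) le_rfl
              (fun j h1 h2 => by rw [pvPhase_turn2 hb h01 j, decide_eq_decide]; omega)
          | cons b2 r3 =>
            have hb2 := hmem b2
              (hb ▸ List.mem_cons_of_mem _ (List.mem_cons_of_mem _ (List.mem_cons_self ..)))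
            have h12 : b1 < b2 := by
              have hs := hsort; rw [hb] at hs
              exact (List.pairwise_cons.1 (List.pairwise_cons.1 hs).2).1 b2 (List.mem_cons_self ..)
            simp only [hb]
            exact pvA_window past tag _ b1 b2 hb1.1 (le_of_lt h12) (le_of_lt hb2.2)
              (fun j h1 h2 => by rw [pvPhase_turn3 hb h01 h12 j])
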